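-- pv_equiv track=rewrite | github.com/gym22/Advent-of-Code | day14/part2.py | subfinder
-- ===== SOURCE A (Python) =====
-- def subfinder(mylist, pattern):
--     matches = []
--     for i in range(len(mylist)):
--         if mylist[i] == pattern[0] and mylist[i:i + len(pattern)] == pattern:
--             matches.append(i)
--         if len(matches) > 1:
--             break
--     return matches
-- ===== SOURCE B (Python) =====
-- def subfinder(mylist, pattern):
--     n, m = len(mylist), len(pattern)
--     if m == 0:
--         # the empty pattern occurs at every position; report the first two
--         return [0] if n == 0 else [0, 1]
--     if m > n:
--         return []
--     MOD = (1 << 61) - 1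
--     BASE = 131
--     ph = 0
--     for x in pattern:
--         ph = (ph * BASE + x) % MOD
--     wh = 0
--     for x in mylist[:m]:
--         wh = (wh * BASE + x) % MOD
--     power = pow(BASE, m - 1, MOD)
--     matches = []
--     for i in range(n - m + 1):
--         if wh == ph and mylist[i:i + m] == pattern:
--             matches.append(i)
--             if len(matches) == 2:
--                 break
--         if i < n - m:
--             wh = ((wh - mylist[i] * power) * BASE + mylist[i + m]) % MOD
--     return matches
-- ===== Notes on version B (the rewrite author's own statement) =====
-- stated objective: faster
-- what changed: B replaces A's per-position slice comparison by Rabin-Karp string search: a rolling polynomial hash (base 131 mod 2^61-1) updated in O(1) per shift selects candidate positions and only those are verified, stopping after the second match; on adversarial inputs this is expected O(n+m) instead of O(n*m).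
-- outside the precondition, e.g. on subfinder([], []): A returns [], B returns [0]; on subfinder([5], []): A raises IndexError, B returns [0, 1]
import Mathlib
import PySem

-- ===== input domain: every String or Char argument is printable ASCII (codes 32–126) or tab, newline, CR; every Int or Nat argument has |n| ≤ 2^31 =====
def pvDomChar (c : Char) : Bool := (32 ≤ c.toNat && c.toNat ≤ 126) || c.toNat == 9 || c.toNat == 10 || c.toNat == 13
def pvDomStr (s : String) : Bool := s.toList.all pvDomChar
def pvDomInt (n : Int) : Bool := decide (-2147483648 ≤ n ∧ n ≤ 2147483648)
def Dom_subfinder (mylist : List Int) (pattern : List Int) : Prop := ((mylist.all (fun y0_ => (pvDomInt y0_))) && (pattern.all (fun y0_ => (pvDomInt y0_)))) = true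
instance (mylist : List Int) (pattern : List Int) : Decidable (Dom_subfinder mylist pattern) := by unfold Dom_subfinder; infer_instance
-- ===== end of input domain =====

-- B replaces A's per-position slice comparison by Rabin–Karp: a rolling polynomial hash
-- (base 131 mod 2^61-1) updated in O(1) per shift selects candidate positions, each
-- verified before being reported; equal to A on every nonempty pattern.


-- ===== PORT A =====
-- the 'for i in range(len(mylist))' loop with 'matches' accumulator and the break once
-- len(matches) > 1; on an empty pattern Python raises at pattern[0] (outside Pre_),
-- here the option comparison is just false there.
def subfinderGo (mylist : List Int) (pattern : List Int) (ms : List Int) : List Int → List Int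
  | [] => ms
  | i :: rest =>
    let ms :=
      if (PySem.List.pyGet? mylist i == PySem.List.pyGet? pattern 0)
          && (PySem.List.slice mylist (some i) (some (i + (pattern.length : Int))) == pattern)
      then ms ++ [i] else ms
    if ms.length > 1 then ms
    else subfinderGo mylist pattern ms rest

def subfinder (mylist : List Int) (pattern : List Int) : List Int :=
  subfinderGo mylist pattern [] (PySem.List.pyRange 0 mylist.length 1)

-- ===== PORT B =====
-- MOD = (1 << 61) - 1 and BASE = 131 of Source B
def rkMOD : Int := 2305843009213693951

-- one step 'h = (h * BASE + x) % MOD' of Source B's two hashing for-loops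
def hstep (h : Int) (x : Int) : Int := PySem.Int.mod (h * 131 + x) rkMOD

-- 'for i in range(n - m + 1): …' — candidate test (hash equality) plus verification,
-- break after the second match, rolling update guarded by 'if i < n - m'; the two
-- indexings mylist[i], mylist[i + m] are always in range here (0 ≤ i < n - m, m ≥ 1).
def rkGo (mylist : List Int) (pattern : List Int) (ph : Int) (power : Int) :
    Int → List Int → List Int → List Int
  | _, acc, [] => acc
  | wh, acc, i :: rest =>
    let acc' :=
      if wh == ph
          && (PySem.List.slice mylist (some i) (some (i + (pattern.length : Int))) == pattern)
      then acc ++ [i] else acc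
    if acc'.length == 2 then acc'
    else
      let wh' :=
        if i < (mylist.length : Int) - (pattern.length : Int) then
          PySem.Int.mod ((wh - PySem.List.pyGetD mylist i 0 * power) * 131
            + PySem.List.pyGetD mylist (i + (pattern.length : Int)) 0) rkMOD
        else wh
      rkGo mylist pattern ph power wh' acc' rest

def subfinder_alt (mylist : List Int) (pattern : List Int) : List Int :=
  let n : Int := mylist.length
  let m : Int := pattern.length
  if m == 0 then (if n == 0 then [0] else [0, 1])
  else if m > n then []
  else
    let ph := pattern.foldl hstep 0
    let wh := (PySem.List.slice mylist none (some m)).foldl hstep 0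
    let power := PySem.Int.powMod 131 (m - 1).toNat rkMOD
    rkGo mylist pattern ph power wh [] (PySem.List.pyRange 0 (n - m + 1) 1)

-- ===== PRECONDITION & SPEC =====
-- Pre_ excludes empty patterns: with nonempty mylist A raises IndexError at pattern[0];
-- on ([], []) A's [] is an accident of the empty range while B's [0] (the empty pattern
-- occurs at 0) is equally defensible, so that corner is excluded too.
def Pre_subfinder (mylist : List Int) (pattern : List Int) : Prop := pattern ≠ []
instance (mylist : List Int) (pattern : List Int) : Decidable (Pre_subfinder mylist pattern) := by unfold Pre_subfinder; infer_instance

def pvWitness_subfinder : List Int × List Int := ([1, 2, 1, 2, 1], [1, 2])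

def Spec_subfinder (mylist : List Int) (pattern : List Int) (out : List Int) : Prop := out = subfinder_alt mylist pattern
instance (mylist : List Int) (pattern : List Int) (out : List Int) : Decidable (Spec_subfinder mylist pattern out) := by unfold Spec_subfinder; infer_instance

-- ===== CLAIM (what is proved, stated in full; the proofs are below) =====
def Claim_equal_subfinder : Prop := ∀ (mylist : List Int) (pattern : List Int), Dom_subfinder mylist pattern → Pre_subfinder mylist pattern → Spec_subfinder mylist pattern (subfinder mylist pattern)

-- ===== LEMMAS AND PROOFS =====

-- the slice test of both programs, as a predicate on an Int index
def pCond (mylist : List Int) (pattern : List Int) (i : Int) : Bool :=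
  PySem.List.slice mylist (some i) (some (i + (pattern.length : Int))) == pattern

-- the match positions 0 ≤ i < n, in increasing order
def posList (mylist : List Int) (pattern : List Int) : List Int :=
  (PySem.List.pyRange 0 (mylist.length : Int) 1).filter (pCond mylist pattern)

-- hash of the length-m window starting at position i
def wHash (mylist : List Int) (pattern : List Int) (i : Nat) : Int :=
  ((mylist.drop i).take pattern.length).foldl hstep 0

lemma rkMOD_pos : (0 : Int) < rkMOD := by norm_num [rkMOD]

lemma hstep_eq_emod (h x : Int) : hstep h x = (h * 131 + x) % rkMOD := by
  unfold hstep
  exact PySem.Int.mod_eq_emod_of_pos rkMOD_pos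

lemma hstep_modeq (h x : Int) : hstep h x ≡ h * 131 + x [ZMOD rkMOD] := by
  rw [hstep_eq_emod]
  exact Int.emod_emod_of_dvd _ dvd_rfl

lemma foldl_hstep_shift (xs : List Int) (a : Int) :
    xs.foldl hstep a ≡ a * 131 ^ xs.length + xs.foldl hstep 0 [ZMOD rkMOD] := by
  induction xs generalizing a with
  | nil => simp [List.foldl]
  | cons x xs ih =>
      simp only [List.foldl, List.length_cons]
      calc List.foldl hstep (hstep a x) xs
          ≡ (hstep a x) * 131 ^ xs.length + xs.foldl hstep 0 [ZMOD rkMOD] := ih _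
        _ ≡ (a * 131 + x) * 131 ^ xs.length + xs.foldl hstep 0 [ZMOD rkMOD] :=
              Int.ModEq.add_right _ (Int.ModEq.mul_right _ (hstep_modeq a x))
        _ = a * 131 ^ (xs.length + 1) + (x * 131 ^ xs.length + xs.foldl hstep 0) := by ring
        _ ≡ a * 131 ^ (xs.length + 1) + ((hstep 0 x) * 131 ^ xs.length + xs.foldl hstep 0)
              [ZMOD rkMOD] := by
              exact Int.ModEq.add_left _ (Int.ModEq.add_right _
                (Int.ModEq.mul_right _ (by simpa using (hstep_modeq 0 x).symm)))
        _ ≡ a * 131 ^ (xs.length + 1) + xs.foldl hstep (hstep 0 x) [ZMOD rkMOD] :=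
              Int.ModEq.add_left _ (ih _).symm

lemma pCond_nonneg_iff (mylist pattern : List Int) (i : Int) (hi : 0 ≤ i) :
    pCond mylist pattern i = true ↔ (mylist.drop i.toNat).take pattern.length = pattern := by
  unfold pCond
  rw [PySem.List.slice_toNat mylist hi (by omega)]
  have h2 : (i + (pattern.length : Int)).toNat - i.toNat = pattern.length := by omega
  rw [h2, beq_iff_eq]

lemma pCond_bound (mylist pattern : List Int) (i : Int) (hi : 0 ≤ i)
    (hp : pattern ≠ []) (h : pCond mylist pattern i = true) :
    i + (pattern.length : Int) ≤ (mylist.length : Int) := by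
  rw [pCond_nonneg_iff mylist pattern i hi] at h
  have hlen := congrArg List.length h
  rw [List.length_take, List.length_drop] at hlen
  have : pattern.length ≥ 1 := List.length_pos_iff.mpr hp
  omega

-- A's first-element guard is redundant on a real match
lemma guard_redundant (mylist pattern : List Int) (hp : pattern ≠ []) (i : Int) (hi : 0 ≤ i)
    (hlt : i < (mylist.length : Int)) (h : pCond mylist pattern i = true) :
    PySem.List.pyGet? mylist i = PySem.List.pyGet? pattern 0 := by
  have hct := (pCond_nonneg_iff mylist pattern i hi).mp h
  have hm : 0 < pattern.length := List.length_pos_iff.mpr hp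
  have hnat : i.toNat < mylist.length := by omega
  have h0 : pattern[0]? = some mylist[i.toNat] := by
    conv_lhs => rw [← hct]
    rw [List.getElem?_take_of_lt hm, List.getElem?_drop]
    simp [hnat]
  rw [PySem.List.pyGet?_of_nonneg mylist hi, PySem.List.pyGet?_of_nonneg pattern (by omega)]
  simp only [Int.toNat_zero]
  rw [h0, List.getElem?_eq_getElem hnat]

-- A's loop computes take 2 of the filtered index list
lemma subfinderGo_eq (mylist pattern : List Int) (hp : pattern ≠ []) (is : List Int)
    (hmem : ∀ i ∈ is, 0 ≤ i ∧ i < (mylist.length : Int)) (acc : List Int) (hacc : acc.length ≤ 1) :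
    subfinderGo mylist pattern acc is = acc ++ (is.filter (pCond mylist pattern)).take (2 - acc.length) := by
  induction is generalizing acc with
  | nil => simp [subfinderGo]
  | cons i rest ih =>
      obtain ⟨hi0, hilt⟩ := hmem i (List.mem_cons_self)
      have hguard : ((PySem.List.pyGet? mylist i == PySem.List.pyGet? pattern 0)
          && (PySem.List.slice mylist (some i) (some (i + (pattern.length : Int))) == pattern))
          = pCond mylist pattern i := by
        cases hpc : pCond mylist pattern i
        · have : (PySem.List.slice mylist (some i) (some (i + (pattern.length : Int))) == pattern) = false := hpc
          simp [this]
        · have h1 := guard_redundant mylist pattern hp i hi0 hilt hpc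
          have h2 : (PySem.List.slice mylist (some i) (some (i + (pattern.length : Int))) == pattern) = true := hpc
          simp [h1, h2]
      have hrest : ∀ j ∈ rest, 0 ≤ j ∧ j < (mylist.length : Int) := fun j hj => hmem j (List.mem_cons_of_mem _ hj)
      simp only [subfinderGo, hguard]
      cases hpc : pCond mylist pattern i
      · simp only [Bool.false_eq_true, if_false]
        have : ¬ acc.length > 1 := by omega
        simp only [if_neg this]
        rw [ih hrest acc hacc, List.filter_cons_of_neg (by simp [hpc])]
      · simp only [if_true]
        rw [List.filter_cons_of_pos hpc]
        rcases Nat.lt_or_ge acc.length 1 with h1 | h1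
        · have h0 : acc.length = 0 := by omega
          have : ¬ (acc ++ [i]).length > 1 := by simp [h0]
          simp only [if_neg this]
          rw [ih hrest (acc ++ [i]) (by simp [h0])]
          simp [h0, List.take_succ_cons]
        · have h1' : acc.length = 1 := by omega
          have : (acc ++ [i]).length > 1 := by simp [h1']
          simp only [if_pos this]
          simp [h1', List.take_succ_cons]

lemma subfinder_eq_take (mylist pattern : List Int) (hp : pattern ≠ []) :
    subfinder mylist pattern = (posList mylist pattern).take 2 := by
  unfold subfinder posList
  rw [subfinderGo_eq mylist pattern hp _ (fun i hi => by
    have := PySem.List.mem_pyRange_one.mp hi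
    omega) [] (by simp)]
  simp

-- positions at which the window would be shorter than the pattern never match
lemma filter_tail_nil (mylist pattern : List Int) (hp : pattern ≠ []) (a b : Int)
    (ha : (mylist.length : Int) - (pattern.length : Int) + 1 ≤ a) (h0 : 0 ≤ a) :
    (PySem.List.pyRange a b 1).filter (pCond mylist pattern) = [] := by
  apply List.filter_eq_nil_iff.mpr
  intro i hi
  have hmem := PySem.List.mem_pyRange_one.mp hi
  cases hpc : pCond mylist pattern i
  · simp
  · exfalso
    have := pCond_bound mylist pattern i (by omega) hp hpc
    have : pattern.length ≥ 1 := List.length_pos_iff.mpr hp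
    omega

-- the rolling update of Source B advances the window hash by one position
lemma rolling (mylist pattern : List Int) (hp : pattern ≠ []) (i : Nat)
    (hi : i + pattern.length < mylist.length) :
    ((wHash mylist pattern i
        - mylist[i]'(by have := List.length_pos_iff.mpr hp; omega)
          * ((131 : Int) ^ (pattern.length - 1) % rkMOD)) * 131
      + mylist[i + pattern.length]'(by omega)) % rkMOD
    = wHash mylist pattern (i + 1) := by
  have hm : 1 ≤ pattern.length := List.length_pos_iff.mpr hp
  have hiL : i < mylist.length := by omega
  set m := pattern.length with hmdef
  set x := mylist[i]'(by omega) with hxdef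
  set z := mylist[i + m]'(by omega) with hzdef
  set mid := (mylist.drop (i + 1)).take (m - 1) with hmid
  have hmidlen : mid.length = m - 1 := by
    rw [hmid, List.length_take, List.length_drop]
    omega
  have hwin1 : (mylist.drop i).take m = x :: mid := by
    rw [List.drop_eq_getElem_cons hiL]
    have : m = (m - 1) + 1 := by omega
    rw [this, List.take_succ_cons]
  have hwin2 : (mylist.drop (i + 1)).take m = mid ++ [z] := by
    have : m = (m - 1) + 1 := by omega
    rw [this, List.take_add_one, hmid]
    have hgz : (mylist.drop (i + 1))[m - 1]? = some z := by
      rw [List.getElem?_drop]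
      have : i + 1 + (m - 1) = i + m := by omega
      rw [this, List.getElem?_eq_getElem (by omega)]
    rw [hgz]
    rfl
  have hsplit : wHash mylist pattern i = mid.foldl hstep (hstep 0 x) := by
    unfold wHash
    rw [← hmdef, hwin1]
    rfl
  have h2 : wHash mylist pattern (i + 1) = (mid.foldl hstep 0 * 131 + z) % rkMOD := by
    unfold wHash
    rw [← hmdef, hwin2, List.foldl_append]
    simp only [List.foldl]
    rw [hstep_eq_emod]
  rw [h2]
  -- both sides are emod rkMOD of congruent integers
  have hW : wHash mylist pattern i ≡ x * 131 ^ (m - 1) + mid.foldl hstep 0 [ZMOD rkMOD] := by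
    rw [hsplit]
    calc mid.foldl hstep (hstep 0 x)
        ≡ (hstep 0 x) * 131 ^ mid.length + mid.foldl hstep 0 [ZMOD rkMOD] :=
          foldl_hstep_shift mid (hstep 0 x)
      _ ≡ x * 131 ^ (m - 1) + mid.foldl hstep 0 [ZMOD rkMOD] := by
          rw [hmidlen]
          exact Int.ModEq.add_right _ (Int.ModEq.mul_right _ (by simpa using hstep_modeq 0 x))
  have hP : ((131 : Int) ^ (m - 1) % rkMOD) ≡ 131 ^ (m - 1) [ZMOD rkMOD] :=
    Int.emod_emod_of_dvd _ dvd_rfl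
  have hsub : wHash mylist pattern i - x * ((131 : Int) ^ (m - 1) % rkMOD)
      ≡ mid.foldl hstep 0 [ZMOD rkMOD] := by
    calc wHash mylist pattern i - x * ((131 : Int) ^ (m - 1) % rkMOD)
        ≡ (x * 131 ^ (m - 1) + mid.foldl hstep 0) - x * 131 ^ (m - 1) [ZMOD rkMOD] :=
          Int.ModEq.sub hW (Int.ModEq.mul_left x hP)
      _ = mid.foldl hstep 0 := by ring
  exact Int.ModEq.add_right z (Int.ModEq.mul_right 131 hsub)

-- B's candidate test (hash equality plus verification) is verification alone
lemma hit_eq_pCond (mylist pattern : List Int) (s : Int) (hs : 0 ≤ s) :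
    ((wHash mylist pattern s.toNat == pattern.foldl hstep 0)
      && (PySem.List.slice mylist (some s) (some (s + (pattern.length : Int))) == pattern))
    = pCond mylist pattern s := by
  cases hpc : pCond mylist pattern s
  · have : (PySem.List.slice mylist (some s) (some (s + (pattern.length : Int))) == pattern) = false := hpc
    simp [this]
  · have hwin := (pCond_nonneg_iff mylist pattern s hs).mp hpc
    have hwh : wHash mylist pattern s.toNat = pattern.foldl hstep 0 := by
      unfold wHash
      rw [hwin]
    have h2 : (PySem.List.slice mylist (some s) (some (s + (pattern.length : Int))) == pattern) = true := hpc
    simp [hwh, h2]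

-- B's scan loop computes take 2 of the filtered candidate range
lemma rkGo_eq (mylist pattern : List Int) (hp : pattern ≠ [])
    (k : Nat) (s : Int) (hs : 0 ≤ s)
    (hk : ((mylist.length : Int) - (pattern.length : Int) + 1 - s).toNat = k)
    (hse : s ≤ (mylist.length : Int) - (pattern.length : Int))
    (acc : List Int) (hacc : acc.length ≤ 1) :
    rkGo mylist pattern (pattern.foldl hstep 0) ((131 : Int) ^ (pattern.length - 1) % rkMOD)
        (wHash mylist pattern s.toNat) acc
        (PySem.List.pyRange s ((mylist.length : Int) - (pattern.length : Int) + 1) 1)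
      = acc ++ ((PySem.List.pyRange s ((mylist.length : Int) - (pattern.length : Int) + 1) 1).filter
          (pCond mylist pattern)).take (2 - acc.length) := by
  induction k generalizing s acc with
  | zero => omega
  | succ k ih =>
      have hm : 1 ≤ pattern.length := List.length_pos_iff.mpr hp
      have hcons := PySem.List.pyRange_one_cons
        (a := s) (b := (mylist.length : Int) - (pattern.length : Int) + 1) (by omega)
      rw [hcons]
      simp only [rkGo, hit_eq_pCond mylist pattern s hs]
      cases hpc : pCond mylist pattern s
      · simp only [Bool.false_eq_true, if_false]
        have hne : (acc.length == 2) = false := by simp; omega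
        simp only [hne, Bool.false_eq_true, if_false]
        rw [List.filter_cons_of_neg (by simp [hpc])]
        by_cases hlast : s < (mylist.length : Int) - (pattern.length : Int)
        · simp only [if_pos hlast]
          have hupd : PySem.Int.mod
              ((wHash mylist pattern s.toNat - PySem.List.pyGetD mylist s 0
                  * ((131 : Int) ^ (pattern.length - 1) % rkMOD)) * 131
                + PySem.List.pyGetD mylist (s + (pattern.length : Int)) 0) rkMOD
              = wHash mylist pattern (s + 1).toNat := by
            rw [PySem.Int.mod_eq_emod_of_pos rkMOD_pos,
              PySem.List.pyGetD_eq_getElem (i := s) mylist 0 hs (by omega),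
              PySem.List.pyGetD_eq_getElem (i := s + (pattern.length : Int)) mylist 0 (by omega) (by omega)]
            have h1 : (s + (pattern.length : Int)).toNat = s.toNat + pattern.length := by omega
            have h2 : (s + 1).toNat = s.toNat + 1 := by omega
            rw [h2]
            have := rolling mylist pattern hp s.toNat (by omega)
            simpa [h1] using this
          rw [hupd]
          exact ih (s + 1) (by omega) (by omega) (by omega) acc hacc
        · -- s = n - m: last iteration, the remaining range is empty
          have hsl : s = (mylist.length : Int) - (pattern.length : Int) := by omega
          simp only [if_neg hlast]
          have hnil : PySem.List.pyRange (s + 1)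
              ((mylist.length : Int) - (pattern.length : Int) + 1) 1 = [] :=
            PySem.List.pyRange_one_eq_nil (by omega)
          rw [hnil]
          simp [rkGo]
      · simp only [if_true]
        rw [List.filter_cons_of_pos hpc]
        rcases Nat.lt_or_ge acc.length 1 with h1 | h1
        · have h0 : acc.length = 0 := by omega
          have hne : ((acc ++ [s]).length == 2) = false := by simp [h0]
          simp only [hne, Bool.false_eq_true, if_false]
          by_cases hlast : s < (mylist.length : Int) - (pattern.length : Int)
          · simp only [if_pos hlast]
            have hupd : PySem.Int.mod
                ((wHash mylist pattern s.toNat - PySem.List.pyGetD mylist s 0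
                    * ((131 : Int) ^ (pattern.length - 1) % rkMOD)) * 131
                  + PySem.List.pyGetD mylist (s + (pattern.length : Int)) 0) rkMOD
                = wHash mylist pattern (s + 1).toNat := by
              rw [PySem.Int.mod_eq_emod_of_pos rkMOD_pos,
                PySem.List.pyGetD_eq_getElem (i := s) mylist 0 hs (by omega),
                PySem.List.pyGetD_eq_getElem (i := s + (pattern.length : Int)) mylist 0 (by omega) (by omega)]
              have h1' : (s + (pattern.length : Int)).toNat = s.toNat + pattern.length := by omega
              have h2' : (s + 1).toNat = s.toNat + 1 := by omega
              rw [h2']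
              have := rolling mylist pattern hp s.toNat (by omega)
              simpa [h1'] using this
            rw [hupd, ih (s + 1) (by omega) (by omega) (by omega) (acc ++ [s]) (by simp [h0])]
            simp [h0, List.take_succ_cons]
          · have hnil : PySem.List.pyRange (s + 1)
                ((mylist.length : Int) - (pattern.length : Int) + 1) 1 = [] :=
              PySem.List.pyRange_one_eq_nil (by omega)
            simp only [if_neg hlast]
            rw [hnil]
            simp [rkGo, h0, List.take_succ_cons]
        · have h1' : acc.length = 1 := by omega
          have heq : ((acc ++ [s]).length == 2) = true := by simp [h1']
          simp only [heq, if_true]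
          simp [h1', List.take_succ_cons]

lemma subfinder_alt_eq_take (mylist pattern : List Int) (hp : pattern ≠ []) :
    subfinder_alt mylist pattern = (posList mylist pattern).take 2 := by
  have hm : 1 ≤ pattern.length := List.length_pos_iff.mpr hp
  unfold subfinder_alt
  simp only []
  have hm0 : (((pattern.length : Int)) == 0) = false := by simp; omega
  rw [if_neg (by simp at hm0 ⊢; omega)]
  by_cases hbig : (pattern.length : Int) > (mylist.length : Int)
  · rw [if_pos hbig]
    unfold posList
    rw [filter_tail_nil mylist pattern hp 0 (mylist.length : Int) (by omega) (by omega)]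
    rfl
  · rw [if_neg hbig]
    have hwh0 : (PySem.List.slice mylist none (some (pattern.length : Int))).foldl hstep 0
        = wHash mylist pattern (0 : Int).toNat := by
      rw [PySem.List.slice_to mylist (by omega)]
      unfold wHash
      simp
    have hpow : PySem.Int.powMod 131 ((pattern.length : Int) - 1).toNat rkMOD
        = (131 : Int) ^ (pattern.length - 1) % rkMOD := by
      rw [PySem.Int.powMod_eq_emod _ _ rkMOD_pos]
      congr 1
      congr 1
      omega
    rw [hwh0, hpow,
      rkGo_eq mylist pattern hp
        ((mylist.length : Int) - (pattern.length : Int) + 1 - 0).toNat 0 (by omega) rfl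
        (by omega) [] (by simp)]
    unfold posList
    have hsplit : PySem.List.pyRange 0 (mylist.length : Int) 1
        = PySem.List.pyRange 0 ((mylist.length : Int) - (pattern.length : Int) + 1) 1
          ++ PySem.List.pyRange ((mylist.length : Int) - (pattern.length : Int) + 1)
              (mylist.length : Int) 1 := by
      rw [← PySem.List.pyRange_one_append 0 _ _ (by omega) (by omega)]
    rw [hsplit, List.filter_append,
      filter_tail_nil mylist pattern hp ((mylist.length : Int) - (pattern.length : Int) + 1)
        (mylist.length : Int) (by omega) (by omega), List.append_nil]
    simp

-- ===== VERDICT (by name: the statement is the Claim_ definition above) =====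
theorem subfinder_spec : Claim_equal_subfinder := by
  intro mylist pattern _ hpre
  unfold Spec_subfinder
  rw [subfinder_eq_take mylist pattern hpre, subfinder_alt_eq_take mylist pattern hpre]
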